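-- pv_equiv track=rewrite | github.com/shuokabe/crf_glossing | crf_glossing/majority_label.py | reshape_counter
-- ===== SOURCE A (Python) =====
-- def reshape_counter(counter):
--     '''Transform a counter into the following format: morph: [(label, frequency)].'''
--     new_counter = dict()
--     for ((morph, label), freq) in counter.items():
--         if morph in new_counter: # Another label (since counter gives unique pairs)
--             new_counter[morph].append((label, freq))
--         else: # New morpheme, new pair
--             new_counter[morph] = [(label, freq)]
--     return new_counter
-- ===== SOURCE B (Python) =====
-- def reshape_counter(counter):
--     '''Transform a counter into the following format: morph: [(label, frequency)].'''
--     morphs = dict.fromkeys(morph for (morph, _label) in counter)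
--     return {m: [(label, freq) for ((morph, label), freq) in counter.items() if morph == m]
--             for m in morphs}
-- ===== Notes on version B (the rewrite author's own statement) =====
-- stated objective: simpler
-- what changed: Replaces A's incremental per-item dict build (if-in-dict append / else assign) by a two-pass comprehension: dict.fromkeys collects the morphs in first-occurrence order, then a dict comprehension filters the counter once per morph.
import Mathlib
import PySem

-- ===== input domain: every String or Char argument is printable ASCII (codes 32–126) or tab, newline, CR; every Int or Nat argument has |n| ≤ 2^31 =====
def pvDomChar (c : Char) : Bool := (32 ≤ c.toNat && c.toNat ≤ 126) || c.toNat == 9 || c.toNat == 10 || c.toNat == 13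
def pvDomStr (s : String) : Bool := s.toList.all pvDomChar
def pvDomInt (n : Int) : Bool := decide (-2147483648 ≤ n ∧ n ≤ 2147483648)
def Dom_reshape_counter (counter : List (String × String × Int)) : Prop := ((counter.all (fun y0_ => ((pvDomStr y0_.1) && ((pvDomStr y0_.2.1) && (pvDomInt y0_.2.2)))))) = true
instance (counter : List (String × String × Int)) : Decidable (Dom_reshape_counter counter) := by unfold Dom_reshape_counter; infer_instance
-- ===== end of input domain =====

-- B replaces A's incremental dict-building loop by dict.fromkeys over the morphs plus a per-morph
-- filtering dict comprehension (objective: simpler / idiomatic) — same return value.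

-- ===== PORT A =====
-- 'for ((morph, label), freq) in counter.items(): if morph in new_counter: append else assign', then the dict's items.
def reshape_counter (counter : List (String × String × Int)) : List (String × List (String × Int)) :=
  (counter.foldl
    (fun d e =>
      if d.contains e.1 then
        d.modify e.1 [] (fun v => v ++ [(e.2.1, e.2.2)])
      else
        d.insert e.1 [(e.2.1, e.2.2)])
    (PySem.Dict.empty : PySem.Dict String (List (String × Int)))).items

-- ===== PORT B =====
-- Source B: morphs = dict.fromkeys(first components), then a dict comprehension filtering counter per morph.
def reshape_counter_alt (counter : List (String × String × Int)) : List (String × List (String × Int)) :=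
  (PySem.List.dedup (counter.map (fun e => e.1))).map
    (fun m => (m, (counter.filter (fun e => e.1 == m)).map (fun e => (e.2.1, e.2.2))))

-- ===== PRECONDITION & SPEC =====
def Spec_reshape_counter (counter : List (String × String × Int)) (out : List (String × List (String × Int))) : Prop := out = reshape_counter_alt counter
instance (counter : List (String × String × Int)) (out : List (String × List (String × Int))) : Decidable (Spec_reshape_counter counter out) := by unfold Spec_reshape_counter; infer_instance

-- ===== CLAIM (what is proved, stated in full; the proofs are below) =====
def Claim_equal_reshape_counter : Prop := ∀ (counter : List (String × String × Int)), Dom_reshape_counter counter → Spec_reshape_counter counter (reshape_counter counter)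

-- ===== LEMMAS AND PROOFS =====

-- A's conditional step is exactly an unconditional 'd[morph] = d.get(morph, []) + [(label, freq)]'
theorem reshape_step_eq_modify (d : PySem.Dict String (List (String × Int)))
    (e : String × String × Int) :
    (if d.contains e.1 then d.modify e.1 [] (fun v => v ++ [(e.2.1, e.2.2)])
     else d.insert e.1 [(e.2.1, e.2.2)]) = d.modify e.1 [] (fun v => v ++ [(e.2.1, e.2.2)]) := by
  by_cases h : d.contains e.1 = true
  · simp [h]
  · simp only [Bool.not_eq_true] at h
    simp only [h, if_neg Bool.false_ne_true]
    unfold PySem.Dict.modify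
    simp [PySem.Dict.getD_of_not_contains, h]

theorem reshape_counter_spec : Claim_equal_reshape_counter := by
  intro counter _
  unfold Spec_reshape_counter reshape_counter reshape_counter_alt
  rw [PySem.List.foldl_congr_mem _ _
      (fun d (e : String × String × Int) => d.modify e.1 [] (fun v => v ++ [(e.2.1, e.2.2)])) _
      (fun acc x _ => reshape_step_eq_modify acc x)]
  have hmap : counter.foldl
      (fun (d : PySem.Dict String (List (String × Int))) e => d.modify e.1 [] (fun v => v ++ [(e.2.1, e.2.2)]))
      PySem.Dict.empty
    = (counter.map (fun e => (e.1, (e.2.1, e.2.2)))).foldl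
        (fun d p => d.modify p.1 [] (fun v => v ++ [p.2])) PySem.Dict.empty := by
    rw [List.foldl_map]
  rw [hmap]
  set L := counter.map (fun e => (e.1, (e.2.1, e.2.2))) with hL
  have hnd : ((L.foldl (fun d p => d.modify p.1 [] (fun v => v ++ [p.2])) PySem.Dict.empty)).keys.Nodup :=
    PySem.Dict.nodup_keys_foldl_modify_key L Prod.fst [] (fun _ p => (fun v => v ++ [p.2])) _
      (by simp [PySem.Dict.keys_empty])
  rw [PySem.Dict.items_eq_map_keys _ hnd []]
  rw [PySem.Dict.keys_foldl_modify_key L Prod.fst [] (fun _ p => (fun v => v ++ [p.2]))]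
  have hkeys : PySem.Set.update (PySem.Dict.empty : PySem.Dict String (List (String × Int))).keys (L.map Prod.fst)
      = PySem.List.dedup (counter.map (fun e => e.1)) := by
    rw [PySem.List.dedup_eq_ofList]
    simp [hL, PySem.Set.update, PySem.Set.ofList_eq_foldl, PySem.Dict.keys_empty]
  rw [hkeys]
  apply List.map_congr_left
  intro k _
  rw [PySem.Dict.getD_foldl_modify_append L _ k]
  simp [hL]
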